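-- pv_equiv track=rewrite | github.com/41shuyuliu/paper-pdf-flow | scripts/pdf_to_flow_note.py | zh_problem_lines
-- ===== SOURCE A (Python) =====
-- from typing import Dict, List, Tuple
--
-- def detect_caption_tags(caption: str) -> List[str]:
--     c = caption.lower()
--     tags: List[str] = []
--
--     def add(tag: str) -> None:
--         if tag not in tags:
--             tags.append(tag)
--
--     if "schematic" in c or "pipeline" in c:
--         add("流程/装置示意")
--     if "bioprint" in c:
--         add("生物打印构建")
--     if "matrigel" in c:
--         add("Matrigel 几何与厚度优化")
--     if "viability" in c:
--         add("细胞活性验证")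
--     if "transcript" in c or "rna" in c:
--         add("转录组/分子一致性对比")
--     if "tracking" in c or "interferometry" in c or "hslci" in c:
--         add("单类器官追踪与动态成像")
--     if "drug" in c or "treated" in c or "response" in c:
--         add("药物响应分析")
--     if "resistant" in c or "sensitive" in c or "heterogeneity" in c:
--         add("耐药/敏感亚群与异质性")
--     if "atp" in c:
--         add("终点 ATP 对照")
--
--     return tags
--
-- def zh_problem_lines(figs: List[Tuple[str, str]], signals: Dict[str, List[str]]) -> List[str]:
--     tags: List[str] = []
--     for _, cap in figs:
--         for t in detect_caption_tags(cap):
--             if t not in tags: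
--                 tags.append(t)
--
--     lines: List[str] = []
--     if "药物响应分析" in tags:
--         lines.append("- 传统流程常依赖单一终点读数，难以完整刻画药物响应的动态变化。")
--     if "耐药/敏感亚群与异质性" in tags:
--         lines.append("- 群体平均指标容易掩盖样本内异质性，难识别耐药/敏感亚群。")
--     if "生物打印构建" in tags:
--         lines.append("- 手工构建或非标准化流程重复性不足，影响高通量实验的一致性。")
--     if not lines:
--         lines.append("- 这篇论文关心的是：怎样把方法、验证和结论连成一条能复现的完整链条。")
--     lines.append("- 作者想做的是一套能批量开展、能持续观察、还能算出结果的实验流程。")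
--     return lines[:4]
-- ===== SOURCE B (Python) =====
-- from typing import Dict, List, Tuple
--
-- def zh_problem_lines(figs: List[Tuple[str, str]], signals: Dict[str, List[str]]) -> List[str]:
--     drug = subpop = bioprint = False
--     for _, cap in figs:
--         c = cap.lower()
--         drug = drug or "drug" in c or "treated" in c or "response" in c
--         subpop = subpop or "resistant" in c or "sensitive" in c or "heterogeneity" in c
--         bioprint = bioprint or "bioprint" in c
--     lines: List[str] = []
--     if drug:
--         lines.append("- 传统流程常依赖单一终点读数，难以完整刻画药物响应的动态变化。")
--     if subpop:
--         lines.append("- 群体平均指标容易掩盖样本内异质性，难识别耐药/敏感亚群。")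
--     if bioprint:
--         lines.append("- 手工构建或非标准化流程重复性不足，影响高通量实验的一致性。")
--     if not lines:
--         lines.append("- 这篇论文关心的是：怎样把方法、验证和结论连成一条能复现的完整链条。")
--     lines.append("- 作者想做的是一套能批量开展、能持续观察、还能算出结果的实验流程。")
--     return lines
-- ===== Notes on version B (the rewrite author's own statement) =====
-- stated objective: simpler
-- what changed: B drops detect_caption_tags and the deduplicated tag-list construction entirely; a single pass over figs maintains just three booleans (drug-response, subpopulation, bioprint) and the lines are emitted from those flags, with no tag lists and no [:4] slice (at most 4 lines can ever be produced).
import Mathlib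
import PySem

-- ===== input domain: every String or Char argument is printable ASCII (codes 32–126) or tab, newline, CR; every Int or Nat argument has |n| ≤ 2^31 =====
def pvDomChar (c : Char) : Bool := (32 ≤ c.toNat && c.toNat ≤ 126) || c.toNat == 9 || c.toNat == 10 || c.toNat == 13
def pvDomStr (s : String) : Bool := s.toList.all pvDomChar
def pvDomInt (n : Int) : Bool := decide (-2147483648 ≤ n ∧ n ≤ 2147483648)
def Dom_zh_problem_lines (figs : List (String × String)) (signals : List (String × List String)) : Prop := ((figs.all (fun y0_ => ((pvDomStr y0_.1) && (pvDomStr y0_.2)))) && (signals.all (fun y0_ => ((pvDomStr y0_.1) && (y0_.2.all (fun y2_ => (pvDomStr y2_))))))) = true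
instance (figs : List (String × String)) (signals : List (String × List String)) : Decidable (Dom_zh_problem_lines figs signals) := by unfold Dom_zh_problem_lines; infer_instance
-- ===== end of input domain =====

-- B replaces the per-caption 9-tag list with a single pass keeping three booleans; return value only, no mutation.

-- ===== PORT A =====
-- 'add' closure of detect_caption_tags: append tag if not already present
def pvAdd (tags : List String) (t : String) : List String :=
  if tags.contains t then tags else tags ++ [t]

def detect_caption_tags (caption : String) : List String :=
  let c := PySem.Str.lower caption
  let tags : List String := []
  let tags := if PySem.Str.isIn "schematic" c || PySem.Str.isIn "pipeline" c then pvAdd tags "流程/装置示意" else tags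
  let tags := if PySem.Str.isIn "bioprint" c then pvAdd tags "生物打印构建" else tags
  let tags := if PySem.Str.isIn "matrigel" c then pvAdd tags "Matrigel 几何与厚度优化" else tags
  let tags := if PySem.Str.isIn "viability" c then pvAdd tags "细胞活性验证" else tags
  let tags := if PySem.Str.isIn "transcript" c || PySem.Str.isIn "rna" c then pvAdd tags "转录组/分子一致性对比" else tags
  let tags := if PySem.Str.isIn "tracking" c || PySem.Str.isIn "interferometry" c || PySem.Str.isIn "hslci" c then pvAdd tags "单类器官追踪与动态成像" else tags
  let tags := if PySem.Str.isIn "drug" c || PySem.Str.isIn "treated" c || PySem.Str.isIn "response" c then pvAdd tags "药物响应分析" else tags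
  let tags := if PySem.Str.isIn "resistant" c || PySem.Str.isIn "sensitive" c || PySem.Str.isIn "heterogeneity" c then pvAdd tags "耐药/敏感亚群与异质性" else tags
  let tags := if PySem.Str.isIn "atp" c then pvAdd tags "终点 ATP 对照" else tags
  tags

def zh_problem_lines (figs : List (String × String)) (signals : List (String × List String)) : List String :=
  let tags : List String :=
    figs.foldl (fun tags p => (detect_caption_tags p.2).foldl (fun tags t => if tags.contains t then tags else tags ++ [t]) tags) []
  let lines : List String := []
  let lines := if tags.contains "药物响应分析" then lines ++ ["- 传统流程常依赖单一终点读数，难以完整刻画药物响应的动态变化。"] else lines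
  let lines := if tags.contains "耐药/敏感亚群与异质性" then lines ++ ["- 群体平均指标容易掩盖样本内异质性，难识别耐药/敏感亚群。"] else lines
  let lines := if tags.contains "生物打印构建" then lines ++ ["- 手工构建或非标准化流程重复性不足，影响高通量实验的一致性。"] else lines
  let lines := if lines.isEmpty then lines ++ ["- 这篇论文关心的是：怎样把方法、验证和结论连成一条能复现的完整链条。"] else lines
  let lines := lines ++ ["- 作者想做的是一套能批量开展、能持续观察、还能算出结果的实验流程。"]
  PySem.List.slice lines none (some 4)

-- ===== PORT B =====
def zh_problem_lines_alt (figs : List (String × String)) (signals : List (String × List String)) : List String :=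
  let fl := figs.foldl (fun (st : Bool × Bool × Bool) p =>
    let c := PySem.Str.lower p.2
    (st.1 || PySem.Str.isIn "drug" c || PySem.Str.isIn "treated" c || PySem.Str.isIn "response" c,
     st.2.1 || PySem.Str.isIn "resistant" c || PySem.Str.isIn "sensitive" c || PySem.Str.isIn "heterogeneity" c,
     st.2.2 || PySem.Str.isIn "bioprint" c)) (false, false, false)
  let lines : List String := []
  let lines := if fl.1 then lines ++ ["- 传统流程常依赖单一终点读数，难以完整刻画药物响应的动态变化。"] else lines
  let lines := if fl.2.1 then lines ++ ["- 群体平均指标容易掩盖样本内异质性，难识别耐药/敏感亚群。"] else lines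
  let lines := if fl.2.2 then lines ++ ["- 手工构建或非标准化流程重复性不足，影响高通量实验的一致性。"] else lines
  let lines := if lines.isEmpty then lines ++ ["- 这篇论文关心的是：怎样把方法、验证和结论连成一条能复现的完整链条。"] else lines
  lines ++ ["- 作者想做的是一套能批量开展、能持续观察、还能算出结果的实验流程。"]

-- ===== PRECONDITION & SPEC =====
def Spec_zh_problem_lines (figs : List (String × String)) (signals : List (String × List String)) (out : List String) : Prop := out = zh_problem_lines_alt figs signals
instance (figs : List (String × String)) (signals : List (String × List String)) (out : List String) : Decidable (Spec_zh_problem_lines figs signals out) := by unfold Spec_zh_problem_lines; infer_instance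

-- ===== CLAIM (what is proved, stated in full; the proofs are below) =====
def Claim_equal_zh_problem_lines : Prop := ∀ (figs : List (String × String)) (signals : List (String × List String)), Dom_zh_problem_lines figs signals → Spec_zh_problem_lines figs signals (zh_problem_lines figs signals)

-- ===== LEMMAS AND PROOFS =====

theorem mem_pvAdd (tags : List String) (t x : String) :
    x ∈ pvAdd tags t ↔ x ∈ tags ∨ x = t := by
  unfold pvAdd; split <;> simp_all

theorem mem_pvAdd_if (tags : List String) (b : Bool) (t x : String) :
    x ∈ (if b then pvAdd tags t else tags) ↔ (b = true ∧ x = t) ∨ x ∈ tags := by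
  cases b <;> simp [mem_pvAdd] <;> tauto

theorem mem_dct_drug (cap : String) :
    "药物响应分析" ∈ detect_caption_tags cap ↔
      (PySem.Str.isIn "drug" (PySem.Str.lower cap) || PySem.Str.isIn "treated" (PySem.Str.lower cap) || PySem.Str.isIn "response" (PySem.Str.lower cap)) = true := by
  unfold detect_caption_tags
  simp only [mem_pvAdd_if, List.mem_nil_iff]
  simp

theorem mem_dct_sub (cap : String) :
    "耐药/敏感亚群与异质性" ∈ detect_caption_tags cap ↔
      (PySem.Str.isIn "resistant" (PySem.Str.lower cap) || PySem.Str.isIn "sensitive" (PySem.Str.lower cap) || PySem.Str.isIn "heterogeneity" (PySem.Str.lower cap)) = true := by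
  unfold detect_caption_tags
  simp only [mem_pvAdd_if, List.mem_nil_iff]
  simp

theorem mem_dct_bio (cap : String) :
    "生物打印构建" ∈ detect_caption_tags cap ↔
      PySem.Str.isIn "bioprint" (PySem.Str.lower cap) = true := by
  unfold detect_caption_tags
  simp only [mem_pvAdd_if, List.mem_nil_iff]
  simp

theorem mem_foldl_pvAdd (l tags : List String) (x : String) :
    x ∈ l.foldl (fun tags t => if tags.contains t then tags else tags ++ [t]) tags ↔ x ∈ tags ∨ x ∈ l := by
  induction l generalizing tags with
  | nil => simp
  | cons h tl ih =>
    simp only [List.foldl_cons]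
    rw [ih]
    have hh : x ∈ (if tags.contains h then tags else tags ++ [h]) ↔ x ∈ tags ∨ x = h := mem_pvAdd tags h x
    rw [hh]; simp only [List.mem_cons]; tauto

theorem mem_tagsA (figs : List (String × String)) (tags : List String) (x : String) :
    x ∈ figs.foldl (fun tags p => (detect_caption_tags p.2).foldl (fun tags t => if tags.contains t then tags else tags ++ [t]) tags) tags
      ↔ x ∈ tags ∨ ∃ p ∈ figs, x ∈ detect_caption_tags p.2 := by
  induction figs generalizing tags with
  | nil => simp
  | cons h tl ih =>
    simp only [List.foldl_cons]
    rw [ih, mem_foldl_pvAdd]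
    constructor
    · rintro ((h1 | h2) | ⟨p, hp, hm⟩)
      · exact Or.inl h1
      · exact Or.inr ⟨h, List.mem_cons_self, h2⟩
      · exact Or.inr ⟨p, List.mem_cons_of_mem _ hp, hm⟩
    · rintro (h1 | ⟨p, hp, hm⟩)
      · exact Or.inl (Or.inl h1)
      · rcases List.mem_cons.1 hp with rfl | hp'
        · exact Or.inl (Or.inr hm)
        · exact Or.inr ⟨p, hp', hm⟩

theorem foldl_flags (figs : List (String × String)) (st : Bool × Bool × Bool) :
    figs.foldl (fun (st : Bool × Bool × Bool) p =>
      let c := PySem.Str.lower p.2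
      (st.1 || PySem.Str.isIn "drug" c || PySem.Str.isIn "treated" c || PySem.Str.isIn "response" c,
       st.2.1 || PySem.Str.isIn "resistant" c || PySem.Str.isIn "sensitive" c || PySem.Str.isIn "heterogeneity" c,
       st.2.2 || PySem.Str.isIn "bioprint" c)) st
    = (st.1 || figs.any (fun p => PySem.Str.isIn "drug" (PySem.Str.lower p.2) || PySem.Str.isIn "treated" (PySem.Str.lower p.2) || PySem.Str.isIn "response" (PySem.Str.lower p.2)),
       st.2.1 || figs.any (fun p => PySem.Str.isIn "resistant" (PySem.Str.lower p.2) || PySem.Str.isIn "sensitive" (PySem.Str.lower p.2) || PySem.Str.isIn "heterogeneity" (PySem.Str.lower p.2)),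
       st.2.2 || figs.any (fun p => PySem.Str.isIn "bioprint" (PySem.Str.lower p.2))) := by
  induction figs generalizing st with
  | nil => simp
  | cons h tl ih =>
    simp only [List.foldl_cons, List.any_cons]
    rw [ih]
    simp [Bool.or_assoc]

-- contains of a specific tag in A's accumulated tag list = B's any-scan, generic in the tag
theorem contains_tags_eq (figs : List (String × String)) (tag : String) (f : String → Bool)
    (h : ∀ cap, tag ∈ detect_caption_tags cap ↔ f cap = true) :
    (figs.foldl (fun tags p => (detect_caption_tags p.2).foldl (fun tags t => if tags.contains t then tags else tags ++ [t]) tags) []).contains tag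
      = figs.any (fun p => f p.2) := by
  rw [Bool.eq_iff_iff]
  constructor
  · intro hc
    have hm : tag ∈ figs.foldl (fun tags p => (detect_caption_tags p.2).foldl (fun tags t => if tags.contains t then tags else tags ++ [t]) tags) [] := by
      simpa using hc
    rcases (mem_tagsA figs [] tag).1 hm with h1 | ⟨p, hp, hdm⟩
    · cases h1
    · exact List.any_eq_true.2 ⟨p, hp, (h p.2).1 hdm⟩
  · intro ha
    rcases List.any_eq_true.1 ha with ⟨p, hp, hc⟩
    have hm : tag ∈ figs.foldl (fun tags p => (detect_caption_tags p.2).foldl (fun tags t => if tags.contains t then tags else tags ++ [t]) tags) [] :=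
      (mem_tagsA figs [] tag).2 (Or.inr ⟨p, hp, (h p.2).2 hc⟩)
    simpa using hm

-- ===== VERDICT (by name: the statement is the Claim_ definition above) =====
theorem zh_problem_lines_spec : Claim_equal_zh_problem_lines := by
  intro figs signals _
  unfold Spec_zh_problem_lines zh_problem_lines zh_problem_lines_alt
  rw [foldl_flags]
  simp only [Bool.false_or]
  rw [contains_tags_eq figs "药物响应分析"
        (fun c => PySem.Str.isIn "drug" (PySem.Str.lower c) || PySem.Str.isIn "treated" (PySem.Str.lower c) || PySem.Str.isIn "response" (PySem.Str.lower c))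
        (fun cap => mem_dct_drug cap),
      contains_tags_eq figs "耐药/敏感亚群与异质性"
        (fun c => PySem.Str.isIn "resistant" (PySem.Str.lower c) || PySem.Str.isIn "sensitive" (PySem.Str.lower c) || PySem.Str.isIn "heterogeneity" (PySem.Str.lower c))
        (fun cap => mem_dct_sub cap),
      contains_tags_eq figs "生物打印构建"
        (fun c => PySem.Str.isIn "bioprint" (PySem.Str.lower c))
        (fun cap => mem_dct_bio cap)]
  generalize (figs.any (fun p => PySem.Str.isIn "drug" (PySem.Str.lower p.2) || PySem.Str.isIn "treated" (PySem.Str.lower p.2) || PySem.Str.isIn "response" (PySem.Str.lower p.2))) = b1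
  generalize (figs.any (fun p => PySem.Str.isIn "resistant" (PySem.Str.lower p.2) || PySem.Str.isIn "sensitive" (PySem.Str.lower p.2) || PySem.Str.isIn "heterogeneity" (PySem.Str.lower p.2))) = b2
  generalize (figs.any (fun p => PySem.Str.isIn "bioprint" (PySem.Str.lower p.2))) = b3
  cases b1 <;> cases b2 <;> cases b3 <;> decide
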